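-- pv_equiv track=rewrite | github.com/fractioneater/aoc-2025 | day10.py | patterns
-- ===== SOURCE A (Python) =====
-- from itertools import combinations, product
--
-- def patterns(coefficients: list[tuple[int, ...]]) -> dict[tuple[int, ...], dict[tuple[int, ...], int]]:
--   num_buttons = len(coefficients)
--   num_variables = len(coefficients[0])
--   out = {parity_pattern: {} for parity_pattern in product(range(2), repeat=num_variables)}
--   for num_pressed_buttons in range(num_buttons + 1):
--     for buttons in combinations(range(num_buttons), num_pressed_buttons):
--       pattern = tuple(map(sum, zip((0,) * num_variables, *(coefficients[i] for i in buttons))))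
--       parity_pattern = tuple(i % 2 for i in pattern)
--       if pattern not in out[parity_pattern]:
--         out[parity_pattern][pattern] = num_pressed_buttons
--   return out
-- ===== SOURCE B (Python) =====
-- from itertools import product
--
-- def patterns(coefficients):
--   num_buttons = len(coefficients)
--   num_variables = len(coefficients[0])
--   out = {p: {} for p in product(range(2), repeat=num_variables)}
--
--   def insert_all(states, count):
--     for pattern, _ in states:
--       parity = tuple(i % 2 for i in pattern)
--       if pattern not in out[parity]:
--         out[parity][pattern] = count
--
--   # Subset-sum DP: a frontier of (pattern, next-button-index) states per press count,
--   # deduplicated early so identical states are expanded only once.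
--   frontier = [((0,) * num_variables, 0)]
--   insert_all(frontier, 0)
--   for count in range(1, num_buttons + 1):
--     gen = [(tuple(a + b for a, b in zip(p, coefficients[j])), j + 1)
--            for p, s in frontier for j in range(s, num_buttons)]
--     insert_all(gen, count)
--     seen = set()
--     frontier = []
--     for e in gen:
--       if e not in seen:
--         seen.add(e)
--         frontier.append(e)
--   return out
-- ===== Notes on version B (the rewrite author's own statement) =====
-- stated objective: alternative
-- what changed: B replaces A's enumeration of all 2^B button combinations (recomputing each coefficient sum from scratch) by a level-by-level frontier DP over (pattern, next-button-index) states that extends each sum incrementally and deduplicates identical states early, so repeated states are expanded only once.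
import Mathlib
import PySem

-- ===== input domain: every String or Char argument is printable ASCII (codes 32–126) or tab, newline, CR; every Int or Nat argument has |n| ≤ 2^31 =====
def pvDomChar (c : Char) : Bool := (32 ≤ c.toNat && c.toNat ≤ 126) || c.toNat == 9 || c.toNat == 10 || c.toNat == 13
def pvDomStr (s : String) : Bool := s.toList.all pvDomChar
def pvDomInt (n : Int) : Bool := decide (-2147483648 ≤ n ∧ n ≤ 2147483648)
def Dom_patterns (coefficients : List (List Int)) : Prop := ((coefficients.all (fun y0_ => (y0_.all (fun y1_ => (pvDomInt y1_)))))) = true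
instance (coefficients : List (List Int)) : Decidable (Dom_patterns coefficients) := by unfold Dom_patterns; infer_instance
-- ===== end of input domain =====

-- B replaces A's enumeration of all 2^B button combinations by a level-by-level frontier DP over
-- (pattern, next-button-index) states deduplicated early; same return value, proved equal on Pre_.

-- shared helpers (identical lines of both Python programs: dict initialisation and the insert-if-absent body)
def vadd (p r : List Int) : List Int := List.zipWith (· + ·) p r

-- product(range(2), repeat=V), leftmost coordinate varying slowest (itertools order)
def prodParity : Nat → List (List Int)
  | 0 => [[]]
  | n + 1 => ([0, 1] : List Int).flatMap (fun b => (prodParity n).map (fun r => b :: r))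

def initOut (V : Nat) : PySem.Dict (List Int) (PySem.Dict (List Int) Int) :=
  (prodParity V).foldl (fun d p => d.insert p PySem.Dict.empty) PySem.Dict.empty

-- 'parity = tuple(i % 2 for i in pattern); if pattern not in out[parity]: out[parity][pattern] = k'
-- (on a missing parity key Python raises KeyError — those inputs are outside Pre_; here the state is left unchanged)
def insPat (out : PySem.Dict (List Int) (PySem.Dict (List Int) Int)) (p : List Int) (k : Int) :
    PySem.Dict (List Int) (PySem.Dict (List Int) Int) :=
  match out.get? (p.map (fun i => PySem.Int.mod i 2)) with
  | none => out
  | some d => if (d.get? p).isSome then out else out.insert (p.map (fun i => PySem.Int.mod i 2)) (d.insert p k)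

-- ===== PORT A =====
-- itertools.combinations(range(n), k) in lexicographic order (library call, ported as the
-- last-element recursion that produces exactly that list)
def nextStart (c : List Nat) : Nat :=
  match c.getLast? with
  | none => 0
  | some j => j + 1

def combsA (n : Nat) : Nat → List (List Nat)
  | 0 => [[]]
  | k + 1 => (combsA n k).flatMap (fun c =>
      (List.range' (nextStart c) (n - nextStart c)).map (fun j => c ++ [j]))

def patterns (coefficients : List (List Int)) : List (List Int × List (List Int × Int)) :=
  let B := coefficients.length
  let V := (coefficients.headD []).length  -- coefficients[0]: IndexError on [] — excluded by Pre_
  let out := (List.range (B + 1)).foldl (fun out k =>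
      (combsA B k).foldl (fun out c =>
        -- pattern = tuple(map(sum, zip((0,)*V, *(coefficients[i] for i in buttons))))
        insPat out ((c.map (fun i => coefficients.getD i [])).foldl vadd (List.replicate V 0)) (k : Int))
        out)
    (initOut V)
  out.items.map (fun kd => (kd.1, kd.2.items))

-- ===== PORT B =====
def extend (coefficients : List (List Int)) (e : List Int × Nat) : List (List Int × Nat) :=
  (List.range' e.2 (coefficients.length - e.2)).map
    (fun j => (vadd e.1 (coefficients.getD j []), j + 1))

def dedupIns {α : Type} [DecidableEq α] (acc : List α) (x : α) : List α :=
  if x ∈ acc then acc else acc ++ [x]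

def insLevel (out : PySem.Dict (List Int) (PySem.Dict (List Int) Int))
    (states : List (List Int × Nat)) (k : Int) : PySem.Dict (List Int) (PySem.Dict (List Int) Int) :=
  states.foldl (fun o e => insPat o e.1 k) out

def patterns_alt (coefficients : List (List Int)) : List (List Int × List (List Int × Int)) :=
  let B := coefficients.length
  let V := (coefficients.headD []).length  -- coefficients[0]: IndexError on [] — excluded by Pre_
  let z : List Int × Nat := (List.replicate V 0, 0)
  let st := (List.range' 1 B).foldl
    (fun (st : PySem.Dict (List Int) (PySem.Dict (List Int) Int) × List (List Int × Nat)) (k : Nat) =>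
      let gen := st.2.flatMap (extend coefficients)
      (insLevel st.1 gen (k : Int), gen.foldl dedupIns []))
    (insLevel (initOut V) [z] 0, [z])
  st.1.items.map (fun kd => (kd.1, kd.2.items))

-- ===== PRECONDITION & SPEC =====
-- Pre_ excludes exactly the inputs on which the Python A raises: the empty list (IndexError on
-- coefficients[0]) and inputs with a row shorter than the first row (the truncated parity tuple is
-- then no key of out, KeyError).
def Pre_patterns (coefficients : List (List Int)) : Prop :=
  coefficients ≠ [] ∧ ∀ r ∈ coefficients, (coefficients.headD []).length ≤ r.length
instance (coefficients : List (List Int)) : Decidable (Pre_patterns coefficients) := by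
  unfold Pre_patterns; infer_instance
def pvWitness_patterns : List (List Int) := [[1, 2], [0, 1]]

def Spec_patterns (coefficients : List (List Int)) (out : List (List Int × List (List Int × Int))) : Prop := out = patterns_alt coefficients
instance (coefficients : List (List Int)) (out : List (List Int × List (List Int × Int))) : Decidable (Spec_patterns coefficients out) := by unfold Spec_patterns; infer_instance

-- ===== CLAIM (what is proved, stated in full; the proofs are below) =====
def Claim_equal_patterns : Prop := ∀ (coefficients : List (List Int)), Dom_patterns coefficients → Pre_patterns coefficients → Spec_patterns coefficients (patterns coefficients)

-- ===== LEMMAS AND PROOFS =====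

-- first-occurrence deduplication, the functional form of B's 'seen'-set loop
def dedupF {α : Type} [DecidableEq α] : List α → List α
  | [] => []
  | a :: l => a :: dedupF (l.filter (fun x => x ≠ a))
termination_by l => l.length
decreasing_by
  refine Nat.lt_succ_of_le ?_
  calc (List.filter _ l.attach).unattach.length = (List.filter _ l.attach).length := List.length_unattach ..
    _ ≤ l.attach.length := List.length_filter_le _ _
    _ = l.length := List.length_attach ..

-- the level-k list of (pattern, next-index) states of ALL k-subsets, in A's (lexicographic) order
def genSeq (co : List (List Int)) : Nat → List (List Int × Nat)
  | 0 => [(List.replicate (co.headD []).length 0, 0)]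
  | k + 1 => (genSeq co k).flatMap (extend co)

theorem foldl_dedupIns {α : Type} [DecidableEq α] :
    ∀ (l acc : List α), l.foldl dedupIns acc = acc ++ dedupF (l.filter (fun x => x ∉ acc)) := by
  intro l
  induction l with
  | nil => intro acc; simp [dedupF]
  | cons a l ih =>
    intro acc
    simp only [List.foldl_cons, List.filter_cons]
    by_cases h : a ∈ acc
    · rw [show dedupIns acc a = acc from if_pos h]
      simp only [h, not_true_eq_false, decide_false]
      exact ih acc
    · rw [show dedupIns acc a = acc ++ [a] from if_neg h]
      rw [ih (acc ++ [a])]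
      simp only [h, not_false_eq_true, decide_true]
      have hf : l.filter (fun x => decide (x ∉ acc ++ [a]))
          = (l.filter (fun x => decide (x ∉ acc))).filter (fun x => decide (x ≠ a)) := by
        rw [List.filter_filter]
        apply List.filter_congr
        intro x _
        simp only [List.mem_append, List.mem_singleton, not_or]
        by_cases h1 : x = a <;> by_cases h2 : x ∈ acc <;> simp [h1, h2]
      rw [hf, List.append_assoc]
      congr 1
      simp only [if_true]
      conv_rhs => rw [dedupF.eq_2]
      simp [List.filter_filter]

theorem mono_foldl {α σ : Type} (ins : σ → α → σ) (P : σ → α → Prop)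
    (hmono : ∀ s x y, P s x → P (ins s y) x) :
    ∀ (zs : List α) (s : σ) (x : α), P s x → P (zs.foldl ins s) x := by
  intro zs
  induction zs with
  | nil => intro s x h; exact h
  | cons z zs ih => intro s x h; exact ih _ _ (hmono _ _ _ h)

theorem present_after {α σ : Type} (ins : σ → α → σ) (P : σ → α → Prop)
    (hmono : ∀ s x y, P s x → P (ins s y) x) (hself : ∀ s x, P (ins s x) x) :
    ∀ (zs : List α) (s : σ) (x : α), x ∈ zs → P (zs.foldl ins s) x := by
  intro zs
  induction zs with
  | nil => intro s x h; cases h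
  | cons z zs ih =>
    intro s x h
    rcases List.mem_cons.mp h with h | h
    · subst h; exact mono_foldl ins P hmono zs _ _ (hself s x)
    · exact ih _ _ h

theorem absorb_block {α σ : Type} (ins : σ → α → σ) (P : σ → α → Prop)
    (habs : ∀ s x, P s x → ins s x = s) :
    ∀ (zs : List α) (s : σ), (∀ x ∈ zs, P s x) → zs.foldl ins s = s := by
  intro zs
  induction zs with
  | nil => intro s _; rfl
  | cons z zs ih =>
    intro s h
    have hz := habs s z (h z (List.mem_cons_self))
    simp only [List.foldl_cons, hz]
    exact ih s (fun x hx => h x (List.mem_cons_of_mem _ hx))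

theorem drop_blocks {α β σ : Type} [DecidableEq α] (ins : σ → β → σ) (P : σ → β → Prop)
    (habs : ∀ s x, P s x → ins s x = s) (hmono : ∀ s x y, P s x → P (ins s y) x)
    (f : α → List β) (a : α) :
    ∀ (l : List α) (s : σ), (∀ y ∈ f a, P s y) →
      ((l.filter (fun x => x ≠ a)).flatMap f).foldl ins s = (l.flatMap f).foldl ins s := by
  intro l
  induction l with
  | nil => intro s _; rfl
  | cons b l ih =>
    intro s h
    by_cases hba : b = a
    · subst hba
      simp only [List.filter_cons, ne_eq, not_true_eq_false, decide_false]
      rw [List.flatMap_cons, List.foldl_append, absorb_block ins P habs (f b) s h]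
      exact ih s h
    · simp only [List.filter_cons, ne_eq, hba, not_false_eq_true, decide_true, if_true]
      rw [List.flatMap_cons, List.flatMap_cons, List.foldl_append, List.foldl_append]
      exact ih ((f b).foldl ins s) (fun y hy => mono_foldl ins P hmono (f b) s y (h y hy))

theorem foldl_ins_dedupF {α β σ : Type} [DecidableEq α] (ins : σ → β → σ) (P : σ → β → Prop)
    (habs : ∀ s x, P s x → ins s x = s) (hmono : ∀ s x y, P s x → P (ins s y) x)
    (hself : ∀ s x, P (ins s x) x) (f : α → List β) :
    ∀ (l : List α) (s : σ), ((dedupF l).flatMap f).foldl ins s = (l.flatMap f).foldl ins s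
  | [], _ => by rw [dedupF]
  | a :: l, s => by
    rw [dedupF.eq_2, List.flatMap_cons, List.flatMap_cons, List.foldl_append, List.foldl_append]
    rw [foldl_ins_dedupF ins P habs hmono hself f (l.filter (fun x => x ≠ a)) ((f a).foldl ins s)]
    exact drop_blocks ins P habs hmono f a l _ (present_after ins P hmono hself (f a) s)
termination_by l _ => l.length
decreasing_by
  have h1 := List.length_filter_le (fun x => decide (x ≠ a)) l
  simp only [List.length_cons]
  omega

-- combinatorial bridge: A's per-level data equals genSeq
theorem combsA_genSeq (co : List (List Int)) :
    ∀ k, (combsA co.length k).map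
        (fun c => ((c.map (fun i => co.getD i [])).foldl vadd
            (List.replicate (co.headD []).length 0), nextStart c))
      = genSeq co k := by
  intro k
  induction k with
  | zero => simp [combsA, genSeq, nextStart]
  | succ k ih =>
    rw [combsA, List.map_flatMap, show genSeq co (k + 1) = (genSeq co k).flatMap (extend co) from rfl,
      ← ih, List.flatMap_map]
    congr 1
    funext c
    rw [List.map_map]
    unfold extend
    apply List.map_congr_left
    intro j _
    refine Prod.ext ?_ ?_
    · show ((c ++ [j]).map (fun i => co.getD i [])).foldl vadd _ = _
      rw [List.map_append, List.foldl_append]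
      rfl
    · show nextStart (c ++ [j]) = j + 1
      simp [nextStart]


-- the two ins instances
theorem dedupIns_props {α : Type} [DecidableEq α] :
    (∀ (s : List α) x, x ∈ s → dedupIns s x = s) ∧
    (∀ (s : List α) x y, x ∈ s → x ∈ dedupIns s y) ∧
    (∀ (s : List α) x, x ∈ dedupIns s x) := by
  refine ⟨fun s x h => if_pos h, fun s x y h => ?_, fun s x => ?_⟩
  · unfold dedupIns; split <;> simp [h]
  · unfold dedupIns; split <;> simp_all

def presentIn (out : PySem.Dict (List Int) (PySem.Dict (List Int) Int)) (p : List Int) : Prop :=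
  match out.get? (p.map (fun i => PySem.Int.mod i 2)) with
  | none => True
  | some d => (d.get? p).isSome = true

theorem insPat_absorb (out : PySem.Dict (List Int) (PySem.Dict (List Int) Int)) (p : List Int) (k : Int)
    (h : presentIn out p) : insPat out p k = out := by
  unfold presentIn at h
  unfold insPat
  cases hg : out.get? (p.map (fun i => PySem.Int.mod i 2)) with
  | none => rfl
  | some d => rw [hg] at h; simp [h]

theorem insPat_self (out : PySem.Dict (List Int) (PySem.Dict (List Int) Int)) (p : List Int) (k : Int) :
    presentIn (insPat out p k) p := by
  unfold insPat
  cases hg : out.get? (p.map (fun i => PySem.Int.mod i 2)) with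
  | none => unfold presentIn; rw [hg]; trivial
  | some d =>
    by_cases hp : (d.get? p).isSome
    · simp only [hp, if_true]
      unfold presentIn; rw [hg]; exact hp
    · simp only [hp, if_false, Bool.false_eq_true]
      unfold presentIn
      rw [PySem.Dict.get?_insert_self]
      simp [PySem.Dict.get?_insert_self]

theorem insPat_mono (out : PySem.Dict (List Int) (PySem.Dict (List Int) Int)) (p q : List Int) (k : Int)
    (h : presentIn out p) : presentIn (insPat out q k) p := by
  unfold insPat
  cases hg : out.get? (q.map (fun i => PySem.Int.mod i 2)) with
  | none => exact h
  | some d =>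
    by_cases hq : (d.get? q).isSome
    · simp only [hq, if_true]; exact h
    · simp only [hq, if_false, Bool.false_eq_true]
      unfold presentIn at h ⊢
      rw [PySem.Dict.get?_insert]
      by_cases hk : p.map (fun i => PySem.Int.mod i 2) = q.map (fun i => PySem.Int.mod i 2)
      · rw [if_pos hk]
        rw [hk, hg] at h
        have h' : (d.get? p).isSome = true := h
        show ((d.insert q k).get? p).isSome = true
        rw [PySem.Dict.get?_insert]
        by_cases hpq : p = q
        · simp [hpq]
        · rw [if_neg hpq]; exact h'
      · rw [if_neg hk]
        cases hg2 : out.get? (p.map (fun i => PySem.Int.mod i 2)) with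
        | none => trivial
        | some d2 => rw [hg2] at h; exact h

-- main invariant: B's state after levels 1..m is A's dict after levels 0..m plus the dedup'd frontier
theorem state_inv (co : List (List Int)) :
    ∀ m, (List.range' 1 m).foldl
        (fun (st : PySem.Dict (List Int) (PySem.Dict (List Int) Int) × List (List Int × Nat)) (k : Nat) =>
          let gen := st.2.flatMap (extend co)
          (insLevel st.1 gen (k : Int), gen.foldl dedupIns []))
        (insLevel (initOut (co.headD []).length) [(List.replicate (co.headD []).length 0, 0)] 0,
          [(List.replicate (co.headD []).length 0, 0)])
      = ((List.range' 1 m).foldl (fun out k => insLevel out (genSeq co k) (k : Int))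
          (insLevel (initOut (co.headD []).length) [(List.replicate (co.headD []).length 0, 0)] 0),
        dedupF (genSeq co m)) := by
  have hprops := @dedupIns_props (List Int × Nat) _
  intro m
  induction m with
  | zero => simp [genSeq, dedupF]
  | succ m ih =>
    rw [List.range'_concat, show 1 + 1 * m = m + 1 from by omega, List.foldl_append,
      List.foldl_append, ih, List.foldl_cons, List.foldl_nil, List.foldl_cons, List.foldl_nil]
    refine Prod.ext ?_ ?_
    · show insLevel _ ((dedupF (genSeq co m)).flatMap (extend co)) _ = insLevel _ (genSeq co (m + 1)) _
      unfold insLevel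
      exact foldl_ins_dedupF (fun o e => insPat o e.1 ((m + 1 : Nat) : Int))
        (fun o e => presentIn o e.1)
        (fun s x h => insPat_absorb s x.1 _ h)
        (fun s x y h => insPat_mono s x.1 y.1 _ h)
        (fun s x => insPat_self s x.1 _)
        (extend co) (genSeq co m) _
    · show ((dedupF (genSeq co m)).flatMap (extend co)).foldl dedupIns [] = dedupF (genSeq co (m + 1))
      rw [foldl_ins_dedupF dedupIns (fun (s : List (List Int × Nat)) x => x ∈ s)
        hprops.1 hprops.2.1 hprops.2.2 (extend co) (genSeq co m) [],
        show (genSeq co m).flatMap (extend co) = genSeq co (m + 1) from rfl,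
        foldl_dedupIns]
      simp

-- ===== VERDICT (by name: the statement is the Claim_ definition above) =====
theorem patterns_spec : Claim_equal_patterns := by
  intro co _ _
  show patterns co = patterns_alt co
  unfold patterns patterns_alt
  dsimp only
  have hfun : (fun (out : PySem.Dict (List Int) (PySem.Dict (List Int) Int)) (k : Nat) =>
      (combsA co.length k).foldl (fun out c =>
        insPat out ((c.map (fun i => co.getD i [])).foldl vadd
          (List.replicate (co.headD []).length 0)) (k : Int)) out)
      = (fun out (k : Nat) => insLevel out (genSeq co k) (k : Int)) := by
    funext out k
    rw [insLevel, ← combsA_genSeq co k, List.foldl_map]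
  rw [hfun, List.range_eq_range', List.range'_succ, List.foldl_cons]
  have hs := congrArg Prod.fst (state_inv co co.length)
  dsimp only at hs
  rw [hs]
  norm_num [genSeq]
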